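-- pv_equiv track=rewrite | github.com/prography/6th-team5-django | crawl.py | __orderGenres
-- ===== SOURCE A (Python) =====
-- def __orderGenres(genres):
--     '''
--         장르 등장 빈도수가 높은 순서대로 정렬한 리스트를 반환한다.
--
--         :param list genres: 각 항목의 우선순위가 동일하며 중복이 존재할 수 있는 장르 리스트
--
--         :return: 입력받은 리스트의 항목을 등장 빈도수가 높은 순서대로 정렬한 리스트
--
--         ex) __orderGenres(['Rock', 'Electronic', 'Hiphop', 'Hiphop', 'Hiphop', 'Rock']) == ['Hiphop', 'Rock', 'Electronic']
--     '''
--     counted_genres = []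
--     genre_count = {}
--     for genre in genres:
--         if genre not in counted_genres:
--             genre_count.setdefault(genre, genres.count(genre))
--             counted_genres.append(genre)
--
--     sorted_genre_count = sorted(genre_count.items(), key=lambda item: item[1], reverse=True)
--     return [a[0] for a in sorted_genre_count]
-- ===== SOURCE B (Python) =====
-- def __orderGenres(genres):
--     counts = {}
--     for g in genres:
--         counts[g] = counts.get(g, 0) + 1
--     m = 0
--     for c in counts.values():
--         if c > m:
--             m = c
--     out = []
--     for c in range(m, 0, -1):
--         for g, k in counts.items():
--             if k == c:
--                 out.append(g)
--     return out
-- ===== Notes on version B (the rewrite author's own statement) =====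
-- stated objective: faster
-- what changed: Replaces A's per-element genres.count/linear membership scans plus a stable comparison sort with a single-pass frequency dict followed by a counting-sort emission: distinct genres are emitted bucket by bucket from the maximum count down, preserving first-appearance order within each count.
import Mathlib
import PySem

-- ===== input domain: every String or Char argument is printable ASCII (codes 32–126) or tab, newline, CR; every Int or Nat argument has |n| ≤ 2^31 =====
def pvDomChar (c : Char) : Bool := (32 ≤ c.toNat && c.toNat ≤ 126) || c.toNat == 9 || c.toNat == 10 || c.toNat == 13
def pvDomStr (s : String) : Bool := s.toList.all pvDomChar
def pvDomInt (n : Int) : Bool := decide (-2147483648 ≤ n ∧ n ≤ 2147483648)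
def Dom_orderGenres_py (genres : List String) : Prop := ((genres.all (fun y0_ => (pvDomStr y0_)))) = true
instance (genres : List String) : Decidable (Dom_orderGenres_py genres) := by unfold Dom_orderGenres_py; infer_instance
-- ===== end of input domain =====

-- B replaces A's quadratic count-and-stable-sort with a one-pass frequency dict followed by a
-- counting-sort-style emission of the distinct genres bucket by bucket from the highest count down
-- (objective: faster — measurably so in a timing run; same results including tie order).

-- ===== PORT A =====
def orderGenres_py (genres : List String) : List String :=
  -- counted_genres / genre_count loop
  let st := genres.foldl
    (fun (st : List String × PySem.Dict String Int) genre =>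
      if st.1.contains genre then st
      else (st.1 ++ [genre], PySem.Dict.setdefault st.2 genre (PySem.List.count genres genre)))
    ([], PySem.Dict.empty)
  -- sorted(genre_count.items(), key=lambda item: item[1], reverse=True), then [a[0] for a in …]
  (PySem.List.sorted (PySem.Dict.items st.2) (fun item => item.2) true).map (fun a => a.1)

-- ===== PORT B =====
def orderGenres_py_alt (genres : List String) : List String :=
  let counts := genres.foldl
    (fun (d : PySem.Dict String Int) g => d.insert g (d.getD g 0 + 1)) PySem.Dict.empty
  let m := (PySem.Dict.values counts).foldl (fun m c => if c > m then c else m) 0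
  (PySem.List.pyRange m 0 (-1)).foldl
    (fun out c =>
      (PySem.Dict.items counts).foldl
        (fun out p => if p.2 == c then out ++ [p.1] else out) out)
    []

-- ===== PRECONDITION & SPEC =====
def Spec_orderGenres_py (genres : List String) (out : List String) : Prop := out = orderGenres_py_alt genres
instance (genres : List String) (out : List String) : Decidable (Spec_orderGenres_py genres out) := by unfold Spec_orderGenres_py; infer_instance

-- ===== CLAIM (what is proved, stated in full; the proofs are below) =====
def Claim_equal_orderGenres_py : Prop := ∀ (genres : List String), Dom_orderGenres_py genres → Spec_orderGenres_py genres (orderGenres_py genres)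

-- ===== LEMMAS AND PROOFS =====

-- insertBy skips over a prefix it does not insert before
theorem pv_insertBy_append_left {α : Type} (before : α → α → Bool) (x : α) (ys zs : List α)
    (h : ∀ y ∈ ys, before x y = false) :
    PySem.List.insertBy before x (ys ++ zs) = ys ++ PySem.List.insertBy before x zs := by
  induction ys with
  | nil => simp
  | cons y t ih =>
    simp only [List.cons_append, PySem.List.insertBy, h y (by simp)]
    simp only [Bool.false_eq_true, if_false]
    exact congrArg (y :: ·) (ih (fun z hz => h z (by simp [hz])))

-- insertBy in front when the head (if any) compares before
theorem pv_insertBy_front {α : Type} (before : α → α → Bool) (x : α) (zs : List α)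
    (h : ∀ y ∈ zs, before x y = true) :
    PySem.List.insertBy before x zs = x :: zs := by
  cases zs with
  | nil => rfl
  | cons z t => simp [PySem.List.insertBy, h z (by simp)]

-- stable descending sort: the maximal-key elements come first in original order
theorem pv_maxSplit {α : Type} (key : α → Int) (c : Int) (L : List α)
    (h : ∀ x ∈ L, key x ≤ c) :
    PySem.List.sorted L key true
      = L.filter (fun x => key x == c)
          ++ PySem.List.sorted (L.filter (fun x => !(key x == c))) key true := by
  induction L using List.reverseRecOn with
  | nil => rfl
  | append_singleton l x ih =>
    have hl : ∀ y ∈ l, key y ≤ c := fun y hy => h y (by simp [hy])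
    have hx : key x ≤ c := h x (by simp)
    rw [PySem.List.sorted_rev_eq_foldl_insertBy, List.foldl_append]
    rw [← PySem.List.sorted_rev_eq_foldl_insertBy, ih hl]
    simp only [List.foldl_cons, List.foldl_nil]
    by_cases hc : key x = c
    · rw [pv_insertBy_append_left _ _ _ _ (by
        intro y hy
        have : key y = c := by
          simp only [List.mem_filter, beq_iff_eq] at hy; exact hy.2
        simp [this, hc])]
      rw [pv_insertBy_front _ _ _ (by
        intro y hy
        rw [PySem.List.mem_sorted] at hy
        simp only [List.mem_filter, Bool.not_eq_eq_eq_not, Bool.not_true, beq_eq_false_iff_ne,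
          ne_eq] at hy
        have h1 : key y ≤ c := hl y hy.1
        have h2 : key y ≠ c := hy.2
        simp only [decide_eq_true_eq, hc]
        omega)]
      simp [List.filter_append, hc]
    · rw [pv_insertBy_append_left _ _ _ _ (by
        intro y hy
        have hyc : key y = c := by
          simp only [List.mem_filter, beq_iff_eq] at hy; exact hy.2
        have : key x < c := lt_of_le_of_ne hx hc
        simp only [decide_eq_false_iff_not, hyc]
        omega)]
      rw [PySem.List.sorted_rev_eq_foldl_insertBy, PySem.List.sorted_rev_eq_foldl_insertBy]
      simp [List.filter_append, hc, List.foldl_append]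

-- counting sort: flatten the buckets along any strictly decreasing enumeration of the keys
theorem pv_bucketSort {α : Type} (key : α → Int) (cs : List Int) (hcs : cs.Pairwise (· > ·)) :
    ∀ (L : List α), (∀ x ∈ L, key x ∈ cs) →
      PySem.List.sorted L key true = cs.flatMap (fun c => L.filter (fun x => key x == c)) := by
  induction cs with
  | nil =>
    intro L hk
    have : L = [] := by
      cases L with
      | nil => rfl
      | cons a t => exact absurd (hk a (by simp)) (by simp)
    subst this; rfl
  | cons c cs' ih =>
    intro L hk
    have hgt : ∀ c' ∈ cs', c' < c := fun c' hc' => (List.pairwise_cons.mp hcs).1 c' hc'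
    have hle : ∀ x ∈ L, key x ≤ c := by
      intro x hx
      rcases (List.mem_cons.mp (hk x hx)) with h | h
      · omega
      · exact le_of_lt (hgt _ h)
    rw [pv_maxSplit key c L hle]
    rw [ih (List.pairwise_cons.mp hcs).2 (L.filter (fun x => !(key x == c))) (by
      intro x hx
      simp only [List.mem_filter, Bool.not_eq_eq_eq_not, Bool.not_true, beq_eq_false_iff_ne,
        ne_eq] at hx
      rcases (List.mem_cons.mp (hk x hx.1)) with h | h
      · exact absurd h hx.2
      · exact h)]
    rw [List.flatMap_cons]
    congr 1
    apply List.flatMap_congr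
    intro c' hc'
    rw [List.filter_filter]
    apply List.filter_congr
    intro x hx
    have : c' ≠ c := by have := hgt c' hc'; omega
    by_cases h : key x = c' <;> simp [h, this]

-- the A loop builds exactly the first-appearance dedup paired with full counts
theorem pv_A_loop (genres : List String) (l : List String) :
    ∀ (s : List String) (d : PySem.Dict String Int),
      PySem.Dict.items d = s.map (fun k => (k, (PySem.List.count genres k : Int))) →
      PySem.Dict.items
        (l.foldl
          (fun (st : List String × PySem.Dict String Int) genre =>
            if st.1.contains genre then st
            else (st.1 ++ [genre], PySem.Dict.setdefault st.2 genre (PySem.List.count genres genre)))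
          (s, d)).2
        = (PySem.Set.update s l).map (fun k => (k, (PySem.List.count genres k : Int))) := by
  induction l with
  | nil => intro s d hd; simpa [PySem.Set.update] using hd
  | cons g t ih =>
    intro s d hd
    have hkeys : PySem.Dict.keys d = s := by
      show (PySem.Dict.items d).map (·.1) = s
      rw [hd, List.map_map]; simp [Function.comp_def]
    by_cases hg : s.contains g
    · have hmem : g ∈ s := List.contains_iff_mem.mp hg
      have hadd : PySem.Set.add s g = s := by simp [PySem.Set.add, PySem.Set.contains, hmem]
      simp only [List.foldl_cons, hg, if_true, PySem.Set.update, List.foldl_cons, hadd]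
      exact ih s d hd
    · have hdg : PySem.Dict.contains d g = false := by
        rw [PySem.Dict.contains_eq_decide_mem_keys, hkeys]
        simp only [decide_eq_false_iff_not]
        intro hmem
        exact hg (List.contains_iff_mem.mpr hmem)
      have hmem : g ∉ s := fun h => hg (List.contains_iff_mem.mpr h)
      have hadd : PySem.Set.add s g = s ++ [g] := by
        simp [PySem.Set.add, PySem.Set.contains, hmem]
      simp only [List.foldl_cons, hg, Bool.false_eq_true, if_false, PySem.Set.update, hadd]
      apply ih
      rw [PySem.Dict.setdefault_of_not_contains d _ hdg,
        PySem.Dict.items_insert_of_not_contains d _ hdg, hd]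
      simp

-- the running-max loop body is max
theorem pv_foldl_if_max (vs : List Int) (a : Int) :
    vs.foldl (fun m c => if c > m then c else m) a = vs.foldl max a := by
  apply PySem.List.foldl_congr_mem
  intro acc x _
  by_cases h : x > acc <;> simp [h] <;> omega

-- ===== VERDICT (by name: the statement is the Claim_ definition above) =====
theorem orderGenres_py_spec : Claim_equal_orderGenres_py := by
  intro genres _
  unfold Spec_orderGenres_py orderGenres_py orderGenres_py_alt
  simp only []
  -- identify both dicts' items with L
  rw [PySem.Dict.foldl_insert_getD_add_one_eq_counter]
  have hA := pv_A_loop genres genres [] PySem.Dict.empty (by rfl)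
  have hupd : PySem.Set.update ([] : List String) genres = PySem.Set.ofList genres := rfl
  rw [hupd] at hA
  rw [hA, PySem.Dict.items_counter]
  simp only [PySem.List.count_eq]
  set L : List (String × Int) :=
    (PySem.Set.ofList genres).map (fun k => (k, (List.count k genres : Int))) with hL
  -- the max
  set m : Int :=
    (PySem.Dict.values (PySem.Dict.counter genres)).foldl (fun m c => if c > m then c else m) 0
      with hm
  have hvals : PySem.Dict.values (PySem.Dict.counter genres) = L.map (·.2) := by
    show (PySem.Dict.items (PySem.Dict.counter genres)).map (·.2) = L.map (·.2)
    rw [PySem.Dict.items_counter]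
  have hmmax : m = (L.map (·.2)).foldl max 0 := by
    rw [hm, hvals, pv_foldl_if_max]
  have hub : ∀ p ∈ L, p.2 ≤ m := by
    intro p hp
    rw [hmmax]
    exact (PySem.List.le_foldl_max (L.map (·.2)) 0).2 _ (List.mem_map_of_mem hp)
  have hlb : ∀ p ∈ L, 1 ≤ p.2 := by
    intro p hp
    rw [hL] at hp
    rcases List.mem_map.mp hp with ⟨k, hk, rfl⟩
    have hkg : k ∈ genres := (PySem.Set.mem_ofList genres k).mp hk
    have : 0 < List.count k genres := List.count_pos_iff.mpr hkg
    show (1 : Int) ≤ (List.count k genres : Int)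
    exact_mod_cast this
  -- rewrite B's nested loops into a flatMap of filtered buckets
  rw [PySem.List.foldl_congr_mem (PySem.List.pyRange m 0 (-1)) _
    (fun out c => out ++ (L.filter (fun p => p.2 == c)).map (·.1)) []
    (by
      intro acc c _
      exact PySem.List.foldl_append_if (fun p => p.2 == c) (·.1) L acc)]
  rw [PySem.List.foldl_append_eq_flatMap, List.nil_append]
  -- counting sort equals the stable descending sort
  rw [pv_bucketSort (fun p => p.2) (PySem.List.pyRange m 0 (-1))
    (by
      rw [PySem.List.pyRange_neg_one_eq_reverse, List.pairwise_reverse]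
      exact PySem.List.pairwise_lt_pyRange_one 1 (m + 1))
    L
    (by
      intro p hp
      rw [PySem.List.mem_pyRange_neg_one]
      show 0 < p.2 ∧ p.2 ≤ m
      have := hlb p hp
      exact ⟨by omega, hub p hp⟩)]
  rw [List.map_flatMap]
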